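-- pv_equiv track=rewrite | github.com/akathorn/codejam | 2010/Round 1C/chess.py | row_to_segments
-- ===== SOURCE A (Python) =====
-- from typing import Any, Callable, List, NamedTuple, Tuple, TypeVar, Union
--
-- Segment = NamedTuple(
--     "Segment", [("start", int), ("end", int), ("length", int), ("color", str)]
-- )
--
-- def row_to_segments(row: str) -> List[Segment]:
--     segments = []
--     start = 0
--     color = row[0]
--     for i, (color1, color2) in enumerate(zip(row, row[1:])):
--         if color1 == color2:
--             segments.append(Segment(start, i + 1, i - start + 1, color))
--             start = i + 1
--             color = color2
--     segments.append(
--         Segment(start, len(row), len(row) - start, color)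
--     )  # Close the last one
--     return segments
-- ===== SOURCE B (Python) =====
-- from typing import List, NamedTuple
--
-- Segment = NamedTuple(
--     "Segment", [("start", int), ("end", int), ("length", int), ("color", str)]
-- )
--
-- def row_to_segments(row: str) -> List[Segment]:
--     n = len(row)
--     bounds = [i + 1 for i in range(n - 1) if row[i] == row[i + 1]]
--     cuts = [0] + bounds + [n]
--     return [Segment(s, e, e - s, row[s]) for s, e in zip(cuts, cuts[1:])]
-- ===== Notes on version B (the rewrite author's own statement) =====
-- stated objective: alternative
-- what changed: Replaces A's single fused scan with running start/color state by two stateless passes: first collect the boundary indices where adjacent characters are equal, then build the segments from consecutive cut points, reading each segment's color directly from the row.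
import Mathlib
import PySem

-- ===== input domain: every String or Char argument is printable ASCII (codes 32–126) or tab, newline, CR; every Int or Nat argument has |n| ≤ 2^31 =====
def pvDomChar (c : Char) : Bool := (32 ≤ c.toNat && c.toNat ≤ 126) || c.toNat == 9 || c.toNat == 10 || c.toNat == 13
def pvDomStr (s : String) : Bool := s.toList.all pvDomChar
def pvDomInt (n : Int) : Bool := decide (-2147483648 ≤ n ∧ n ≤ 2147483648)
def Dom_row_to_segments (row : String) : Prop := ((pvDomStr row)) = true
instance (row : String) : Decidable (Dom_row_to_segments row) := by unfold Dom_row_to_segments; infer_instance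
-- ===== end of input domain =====

-- B re-implements the split as two stateless passes (boundary indices, then segments from cut
-- points) instead of A's fused scan with running start/color state; return-value equivalence only.

-- ===== PORT A =====
-- the fold step of A's loop over enumerate(zip(row, row[1:])) with state (segments, start, color)
def stepA (st : List (Int × Int × Int × String) × Int × Char) (p : Int × Char × Char) :
    List (Int × Int × Int × String) × Int × Char :=
  if p.2.1 = p.2.2 then
    (st.1 ++ [(st.2.1, p.1 + 1, p.1 - st.2.1 + 1, String.mk [st.2.2])], p.1 + 1, p.2.2)
  else st

-- the whole loop of A: fold stepA over enumerate(zip(row, row[1:])) from (segments=[], start=0, color)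
def loopA (cs : List Char) (color0 : Char) : List (Int × Int × Int × String) × Int × Char :=
  (PySem.List.enumerate (cs.zip cs.tail) 0).foldl stepA ([], 0, color0)

def row_to_segments (row : String) : List (Int × Int × Int × String) :=
  match PySem.Str.pyGet? row 0 with
  | none => []  -- row[0] raises IndexError on the empty row; excluded by Pre_
  | some color0 =>
    (loopA row.toList color0).1 ++
      [((loopA row.toList color0).2.1, (row.toList.length : Int),
        (row.toList.length : Int) - (loopA row.toList color0).2.1,
        String.mk [(loopA row.toList color0).2.2])]

-- ===== PORT B =====
-- row[s] as a one-character string ("" marks the IndexError arm, reached only outside Pre_)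
def strAt (cs : List Char) (i : Int) : String :=
  match PySem.List.pyGet? cs i with
  | some c => String.mk [c]
  | none => ""

-- bounds = [i + 1 for i in range(n - 1) if row[i] == row[i + 1]]
def boundsB (cs : List Char) : List Int :=
  (PySem.List.pyRange 0 ((cs.length : Int) - 1) 1).filterMap
    (fun i => if PySem.List.pyGet? cs i = PySem.List.pyGet? cs (i + 1) then some (i + 1) else none)

-- cuts = [0] + bounds + [n]
def cutsB (cs : List Char) : List Int := 0 :: (boundsB cs ++ [(cs.length : Int)])

def row_to_segments_alt (row : String) : List (Int × Int × Int × String) :=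
  ((cutsB row.toList).zip (cutsB row.toList).tail).map
    (fun p => (p.1, p.2, p.2 - p.1, strAt row.toList p.1))

-- ===== PRECONDITION & SPEC =====
-- A (and B) raises IndexError on the empty row (row[0]); those are the only excluded inputs.
def Pre_row_to_segments (row : String) : Prop := row ≠ ""
instance (row : String) : Decidable (Pre_row_to_segments row) := by unfold Pre_row_to_segments; infer_instance
def pvWitness_row_to_segments : String := "aab"

def Spec_row_to_segments (row : String) (out : List (Int × Int × Int × String)) : Prop := out = row_to_segments_alt row
instance (row : String) (out : List (Int × Int × Int × String)) : Decidable (Spec_row_to_segments row out) := by unfold Spec_row_to_segments; infer_instance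

-- ===== CLAIM (what is proved, stated in full; the proofs are below) =====
def Claim_equal_row_to_segments : Prop := ∀ (row : String), Dom_row_to_segments row → Pre_row_to_segments row → Spec_row_to_segments row (row_to_segments row)

-- ===== LEMMAS AND PROOFS =====

-- recursive characterisation of A's fold
def FA (E : List (Int × Char × Char)) (s : Int) (color : Char) :
    List (Int × Int × Int × String) × Int × Char :=
  match E with
  | [] => ([], s, color)
  | (i, c1, c2) :: ps =>
    if c1 = c2 then
      let r := FA ps (i + 1) c2
      ((s, i + 1, i - s + 1, String.mk [color]) :: r.1, r.2)
    else FA ps s color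

def boundsOf (E : List (Int × Char × Char)) : List Int :=
  E.filterMap (fun p => if p.2.1 = p.2.2 then some (p.1 + 1) else none)

lemma foldl_stepA (E : List (Int × Char × Char)) (acc : List (Int × Int × Int × String))
    (s : Int) (color : Char) :
    E.foldl stepA (acc, s, color) = (acc ++ (FA E s color).1, (FA E s color).2) := by
  induction E generalizing acc s color with
  | nil => simp [FA]
  | cons p ps ih =>
    obtain ⟨i, c1, c2⟩ := p
    by_cases h : c1 = c2 <;> simp [FA, stepA, h, ih]

lemma zip_cuts (bd : List Int) (n : Int) : ∀ (s : Int),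
    (s :: (bd ++ [n])).zip (bd ++ [n]) =
      (s :: bd).zip bd ++ [((s :: bd).getLast (by simp), n)] := by
  induction bd with
  | nil => intro s; simp
  | cons b bs ih =>
    intro s
    simp only [List.cons_append, List.zip_cons_cons, ih b, List.getLast_cons (by simp : b :: bs ≠ [])]

lemma main_aux (ds : List Char) : ∀ (ys : List Char) (k : Nat) (s : Int) (color : Char),
    ds = ys.drop k → PySem.List.pyGet? ys s = some color →
    (FA (PySem.List.enumerate (ds.zip ds.tail) (k : Int)) s color).1 =
      ((s :: boundsOf (PySem.List.enumerate (ds.zip ds.tail) (k : Int))).zip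
          (boundsOf (PySem.List.enumerate (ds.zip ds.tail) (k : Int)))).map
        (fun p => (p.1, p.2, p.2 - p.1, strAt ys p.1))
    ∧ (FA (PySem.List.enumerate (ds.zip ds.tail) (k : Int)) s color).2.1 =
        (s :: boundsOf (PySem.List.enumerate (ds.zip ds.tail) (k : Int))).getLast (by simp)
    ∧ PySem.List.pyGet? ys ((FA (PySem.List.enumerate (ds.zip ds.tail) (k : Int)) s color).2.1) =
        some ((FA (PySem.List.enumerate (ds.zip ds.tail) (k : Int)) s color).2.2) := by
  induction ds with
  | nil => intro ys k s color hds hs; simp [FA, boundsOf, hs]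
  | cons c ds' ih =>
    intro ys k s color hds hs
    match ds' with
    | [] => simp [FA, boundsOf, hs]
    | d :: rest =>
      have htail : d :: rest = ys.drop (k + 1) := by
        simpa [List.tail_drop] using congrArg List.tail hds
      have hd1 : PySem.List.pyGet? ys ((k : Int) + 1) = some d := by
        have h1 : ((k : Int) + 1) = ((k + 1 : Nat) : Int) := by push_cast; ring
        rw [h1, PySem.List.pyGet?_natCast]
        rw [show ys[(k+1)]? = (ys.drop (k+1))[0]? by simp [List.getElem?_drop], ← htail]; rfl
      have hstep : PySem.List.enumerate (((c :: d :: rest).zip (c :: d :: rest).tail)) (k : Int)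
          = ((k : Int), (c, d)) :: PySem.List.enumerate ((d :: rest).zip (d :: rest).tail) ((k : Int) + 1) := by
        simp [PySem.List.enumerate_cons]
      rw [hstep]
      by_cases hcd : c = d
      · have hIH := ih ys (k + 1) ((k : Int) + 1) d htail hd1
        push_cast at hIH
        obtain ⟨h1, h2, h3⟩ := hIH
        have hcol : strAt ys s = String.mk [color] := by simp [strAt, hs]
        simp only [boundsOf] at h1 h2 h3 ⊢
        simp only [FA, List.filterMap_cons, if_pos hcd]
        refine ⟨?_, ?_, ?_⟩
        · rw [h1]
          simp [List.zip_cons_cons, hcol]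
          ring
        · rw [List.getLast_cons (l := ((k : Int) + 1) ::
              List.filterMap (fun p => if p.2.1 = p.2.2 then some (p.1 + 1) else none)
                (PySem.List.enumerate ((d :: rest).zip (d :: rest).tail) ((k : Int) + 1)))
              (by simp)]
          exact h2
        · exact h3
      · have hIH := ih ys (k + 1) s color htail hs
        push_cast at hIH
        obtain ⟨h1, h2, h3⟩ := hIH
        simp only [boundsOf] at h1 h2 h3
        refine ⟨?_, ?_, ?_⟩ <;>
          simp only [FA, boundsOf, List.filterMap_cons, if_neg hcd]
        · exact h1
        · exact h2
        · exact h3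

lemma bounds_aux (ds : List Char) :
    ∀ (ys : List Char) (k : Nat), ds = ys.drop k →
    (PySem.List.pyRange (k : Int) ((ys.length : Int) - 1) 1).filterMap
        (fun i => if PySem.List.pyGet? ys i = PySem.List.pyGet? ys (i + 1) then some (i + 1) else none)
      = boundsOf (PySem.List.enumerate ((ds.zip ds.tail)) (k : Int)) := by
  induction ds with
  | nil =>
    intro ys k hds
    have hlen : ys.length ≤ k := by
      have := congrArg List.length hds
      simp [List.length_drop] at this
      omega
    rw [PySem.List.pyRange_one_eq_nil (by omega)]
    simp [boundsOf]
  | cons c ds' ih =>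
    intro ys k hds
    cases ds' with
    | nil =>
      have hlen : ys.length = k + 1 := by
        have h := congrArg List.length hds
        simp [List.length_drop] at h
        omega
      rw [PySem.List.pyRange_one_eq_nil (by omega)]
      simp [boundsOf]
    | cons d rest =>
      have hlen : k + 2 ≤ ys.length := by
        have h := congrArg List.length hds
        simp [List.length_drop] at h
        omega
      have htail : d :: rest = ys.drop (k + 1) := by
        simpa [List.tail_drop] using congrArg List.tail hds
      have hck : PySem.List.pyGet? ys (k : Int) = some c := by
        rw [PySem.List.pyGet?_natCast]
        rw [show ys[k]? = (ys.drop k)[0]? by simp [List.getElem?_drop], ← hds]; rfl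
      have hd1 : PySem.List.pyGet? ys ((k : Int) + 1) = some d := by
        have h1 : ((k : Int) + 1) = ((k + 1 : Nat) : Int) := by push_cast; ring
        rw [h1, PySem.List.pyGet?_natCast]
        rw [show ys[(k+1)]? = (ys.drop (k+1))[0]? by simp [List.getElem?_drop], ← htail]; rfl
      have hIH := ih ys (k + 1) htail
      push_cast at hIH
      have hstep : PySem.List.enumerate (((c :: d :: rest).zip (c :: d :: rest).tail)) (k : Int)
          = ((k : Int), (c, d)) :: PySem.List.enumerate ((d :: rest).zip (d :: rest).tail) ((k : Int) + 1) := by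
        simp [PySem.List.enumerate_cons]
      rw [PySem.List.pyRange_one_cons (by omega), List.filterMap_cons, hstep]
      simp only [hck, hd1, Option.some.injEq, boundsOf, List.filterMap_cons]
      simp only [boundsOf] at hIH
      by_cases hcd : c = d
      · simp [if_pos hcd, hIH]
      · simp [if_neg hcd, hIH]

theorem row_to_segments_spec : Claim_equal_row_to_segments := by
  intro row _ hpre
  unfold Spec_row_to_segments
  obtain ⟨c0, rest, hcs⟩ : ∃ c0 rest, row.toList = c0 :: rest := by
    cases h : row.toList with
    | nil =>
      exfalso
      apply hpre
      have := congrArg String.ofList h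
      simpa using this
    | cons a l => exact ⟨a, l, rfl⟩
  have h0l : PySem.List.pyGet? row.toList 0 = some c0 := by
    rw [show (0 : Int) = ((0 : Nat) : Int) by norm_num, PySem.List.pyGet?_natCast, hcs]; rfl
  have h0 : PySem.Str.pyGet? row 0 = some c0 := by
    have h := PySem.Str.pyGet?_natCast (s := row) (n := 0)
    simp only [Nat.cast_zero] at h
    rw [h, hcs]; rfl
  have hmain := main_aux row.toList row.toList 0 0 c0 (by simp) h0l
  simp only [Nat.cast_zero] at hmain
  obtain ⟨h1, h2, h3⟩ := hmain
  have hb : boundsB row.toList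
      = boundsOf (PySem.List.enumerate (row.toList.zip row.toList.tail) 0) := by
    have hb0 := bounds_aux row.toList row.toList 0 (by simp)
    simp only [Nat.cast_zero] at hb0
    rw [boundsB, hb0]
  simp only [row_to_segments, row_to_segments_alt, h0, loopA, foldl_stepA, List.nil_append,
    cutsB, hb, List.tail_cons, zip_cuts, List.map_append, List.map_cons, List.map_nil, ← h2, h1]
  have hcol : strAt row.toList
      ((FA (PySem.List.enumerate (row.toList.zip row.toList.tail) 0) 0 c0).2.1)
      = String.mk [(FA (PySem.List.enumerate (row.toList.zip row.toList.tail) 0) 0 c0).2.2] := by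
    simp [strAt, h3]
  rw [hcol]
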